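-- pv_equiv track=rewrite | github.com/PaddlePaddle/PaddleX | paddlex_restful/restful/project/evaluate/detection.py | _get_tp_fp_accum
-- ===== SOURCE A (Python) =====
-- def _get_tp_fp_accum(score_pos_list):
--     '''计算真阳/假阳。
--     '''
--     sorted_list = sorted(score_pos_list, key=lambda s: s[0], reverse=True)
--     accum_tp = 0
--     accum_fp = 0
--     accum_tp_list = []
--     accum_fp_list = []
--     for (score, pos) in sorted_list:
--         accum_tp += int(pos)
--         accum_tp_list.append(accum_tp)
--         accum_fp += 1 - int(pos)
--         accum_fp_list.append(accum_fp)
--     return accum_tp_list, accum_fp_list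
-- ===== SOURCE B (Python) =====
-- def _get_tp_fp_accum(score_pos_list):
--     '''Compute the totals first, then build both cumulative lists back-to-front
--     from the totals by subtraction over the reversed sorted list.'''
--     sorted_list = sorted(score_pos_list, key=lambda s: s[0], reverse=True)
--     tp = sum(int(pos) for _, pos in sorted_list)
--     fp = len(sorted_list) - tp
--     tp_list = []
--     fp_list = []
--     for _, pos in reversed(sorted_list):
--         tp_list.append(tp)
--         fp_list.append(fp)
--         tp -= int(pos)
--         fp -= 1 - int(pos)
--     tp_list.reverse()
--     fp_list.reverse()
--     return tp_list, fp_list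
-- ===== Notes on version B (the rewrite author's own statement) =====
-- stated objective: alternative
-- what changed: B computes the grand totals of positives/negatives first and then constructs both cumulative lists back-to-front, walking the reversed sorted list and subtracting each element from the running totals, instead of A's forward pass with two growing accumulators.
import Mathlib
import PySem

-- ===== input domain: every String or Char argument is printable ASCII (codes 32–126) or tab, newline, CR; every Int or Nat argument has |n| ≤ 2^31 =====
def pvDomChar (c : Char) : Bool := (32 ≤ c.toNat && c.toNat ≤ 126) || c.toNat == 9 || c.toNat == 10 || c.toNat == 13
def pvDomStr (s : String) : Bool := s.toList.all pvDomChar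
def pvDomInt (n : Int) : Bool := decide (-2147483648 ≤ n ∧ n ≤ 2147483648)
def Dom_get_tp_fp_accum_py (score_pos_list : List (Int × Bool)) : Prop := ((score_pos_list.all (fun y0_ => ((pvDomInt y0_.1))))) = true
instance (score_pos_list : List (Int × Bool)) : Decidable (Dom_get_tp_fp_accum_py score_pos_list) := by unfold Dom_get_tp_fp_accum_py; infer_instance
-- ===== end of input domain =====

-- B computes the grand totals first and builds both cumulative lists back-to-front by subtraction over the reversed sorted list; return values proved equal.


-- ===== PORT A =====
def get_tp_fp_accum_py (score_pos_list : List (Int × Bool)) : List Int × List Int :=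
  let sorted_list := PySem.List.sorted score_pos_list (fun s => s.1) true
  let st := sorted_list.foldl
    (fun (st : Int × Int × List Int × List Int) sp =>
      let accum_tp := st.1 + (if sp.2 then (1:Int) else 0)
      let accum_tp_list := st.2.2.1 ++ [accum_tp]
      let accum_fp := st.2.1 + (1 - (if sp.2 then (1:Int) else 0))
      let accum_fp_list := st.2.2.2 ++ [accum_fp]
      (accum_tp, accum_fp, accum_tp_list, accum_fp_list))
    (0, 0, [], [])
  (st.2.2.1, st.2.2.2)

-- ===== PORT B =====
def get_tp_fp_accum_py_alt (score_pos_list : List (Int × Bool)) : List Int × List Int :=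
  let sorted_list := PySem.List.sorted score_pos_list (fun s => s.1) true
  let tp0 := sorted_list.foldl (fun a sp => a + (if sp.2 then (1:Int) else 0)) 0
  let fp0 := (sorted_list.length : Int) - tp0
  let st := sorted_list.reverse.foldl
    (fun (st : Int × Int × List Int × List Int) sp =>
      let tp_list := st.2.2.1 ++ [st.1]
      let fp_list := st.2.2.2 ++ [st.2.1]
      (st.1 - (if sp.2 then (1:Int) else 0),
       st.2.1 - (1 - (if sp.2 then (1:Int) else 0)),
       tp_list, fp_list))
    (tp0, fp0, [], [])
  (st.2.2.1.reverse, st.2.2.2.reverse)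

-- ===== PRECONDITION & SPEC =====
def Spec_get_tp_fp_accum_py (score_pos_list : List (Int × Bool)) (out : List Int × List Int) : Prop := out = get_tp_fp_accum_py_alt score_pos_list
instance (score_pos_list : List (Int × Bool)) (out : List Int × List Int) : Decidable (Spec_get_tp_fp_accum_py score_pos_list out) := by unfold Spec_get_tp_fp_accum_py; infer_instance

-- ===== CLAIM (what is proved, stated in full; the proofs are below) =====
def Claim_equal_get_tp_fp_accum_py : Prop := ∀ (score_pos_list : List (Int × Bool)), Dom_get_tp_fp_accum_py score_pos_list → Spec_get_tp_fp_accum_py score_pos_list (get_tp_fp_accum_py score_pos_list)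

-- ===== LEMMAS AND PROOFS =====

def pvB2i (b : Bool) : Int := if b then 1 else 0

/-- number of positives in the list -/
def pvSum : List (Int × Bool) → Int
  | [] => 0
  | x :: rest => pvB2i x.2 + pvSum rest

/-- the TP prefix-sum list starting from accumulator t -/
def pvTps (t : Int) : List (Int × Bool) → List Int
  | [] => []
  | x :: rest => (t + pvB2i x.2) :: pvTps (t + pvB2i x.2) rest

/-- the FP prefix-sum list starting from accumulator f -/
def pvFps (f : Int) : List (Int × Bool) → List Int
  | [] => []
  | x :: rest => (f + (1 - pvB2i x.2)) :: pvFps (f + (1 - pvB2i x.2)) rest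

lemma foldA_spec (xs : List (Int × Bool)) : ∀ (t f : Int) (la lf : List Int),
    xs.foldl
      (fun (st : Int × Int × List Int × List Int) sp =>
        (st.1 + (if sp.2 then (1:Int) else 0),
         st.2.1 + (1 - (if sp.2 then (1:Int) else 0)),
         st.2.2.1 ++ [st.1 + (if sp.2 then (1:Int) else 0)],
         st.2.2.2 ++ [st.2.1 + (1 - (if sp.2 then (1:Int) else 0))]))
      (t, f, la, lf)
    = (xs.foldl (fun a x => a + pvB2i x.2) t,
       xs.foldl (fun a x => a + (1 - pvB2i x.2)) f,
       la ++ pvTps t xs, lf ++ pvFps f xs) := by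
  induction xs with
  | nil => intro t f la lf; simp [pvTps, pvFps]
  | cons x rest ih =>
      intro t f la lf
      simp only [List.foldl_cons, pvTps, pvFps, ih, pvB2i, List.append_assoc,
        List.singleton_append]

lemma sum_foldl (xs : List (Int × Bool)) : ∀ (t : Int),
    xs.foldl (fun a sp => a + (if sp.2 then (1:Int) else 0)) t = t + pvSum xs := by
  induction xs with
  | nil => intro t; simp [pvSum]
  | cons x rest ih => intro t; simp only [List.foldl_cons, pvSum, ih, pvB2i]; ring

/-- B's backwards loop characterised: it peels the totals down and records the
prefix sums in reverse order. -/
lemma foldB_spec (xs : List (Int × Bool)) : ∀ (t f : Int) (la lf : List Int),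
    xs.foldr
      (fun sp (st : Int × Int × List Int × List Int) =>
        (st.1 - (if sp.2 then (1:Int) else 0),
         st.2.1 - (1 - (if sp.2 then (1:Int) else 0)),
         st.2.2.1 ++ [st.1],
         st.2.2.2 ++ [st.2.1]))
      (t, f, la, lf)
    = (t - pvSum xs, f - ((xs.length : Int) - pvSum xs),
       la ++ (pvTps (t - pvSum xs) xs).reverse,
       lf ++ (pvFps (f - ((xs.length : Int) - pvSum xs)) xs).reverse) := by
  induction xs with
  | nil => intro t f la lf; simp [pvSum, pvTps, pvFps]
  | cons x rest ih =>
      intro t f la lf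
      have h1 : t - pvSum (x :: rest) + pvB2i x.2 = t - pvSum rest := by
        simp [pvSum]; ring
      have h2 : f - (((x :: rest).length : Int) - pvSum (x :: rest)) + (1 - pvB2i x.2)
          = f - ((rest.length : Int) - pvSum rest) := by
        simp [pvSum, List.length_cons]; push_cast; ring
      simp only [List.foldr_cons, ih, pvTps, pvFps, h1, h2, List.reverse_cons,
        ← List.append_assoc]
      refine Prod.ext ?_ (Prod.ext ?_ (Prod.ext rfl rfl))
      · simp only [pvSum, pvB2i]; ring
      · simp only [pvSum, pvB2i, List.length_cons]; push_cast; ring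

-- ===== VERDICT (by name: the statement is the Claim_ definition above) =====
theorem get_tp_fp_accum_py_spec : Claim_equal_get_tp_fp_accum_py := by
  intro l _
  show get_tp_fp_accum_py l = get_tp_fp_accum_py_alt l
  unfold get_tp_fp_accum_py get_tp_fp_accum_py_alt
  simp only [foldA_spec, sum_foldl, List.foldl_reverse, foldB_spec, List.nil_append,
    zero_add]
  simp [sub_self]
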